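-- pv_equiv track=rewrite | github.com/pypi-data/pypi-mirror-332 | packages/misty2py-skills/misty2py_skills-2.0.1-py3-none-any.whl/misty2py_skills/question_answering.py | get_intents_keywords
-- ===== SOURCE A (Python) =====
-- from typing import Dict, List, Tuple
--
-- def get_intents_keywords(entities: Dict) -> Tuple[List[str], List[str]]:
--     """Obtains the list of intents and the list of keywords from an Wit.ai entity."""
--     intents = []
--     keywords = []
--     for key, val in entities.items():
--         if key == "intent":
--             intents.extend([dct.get("value") for dct in val])
--         else:
--             keywords.append(key)
--     return intents, keywords
-- ===== SOURCE B (Python) =====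
-- def get_intents_keywords(entities):
--     """Obtains the list of intents and the list of keywords from an Wit.ai entity."""
--     def go(items):
--         if not items:
--             return [], []
--         key, val = items[0]
--         intents, keywords = go(items[1:])
--         if key == "intent":
--             return [dct.get("value") for dct in val] + intents, keywords
--         return intents, [key] + keywords
--     return go(list(entities.items()))
-- ===== Notes on version B (the rewrite author's own statement) =====
-- stated objective: alternative
-- what changed: Replaces A's forward loop that appends to two mutable accumulator lists with a structural recursion over the item list that builds both result lists back-to-front by prepending.
-- outside the precondition, e.g. on get_intents_keywords({'intent': [{'value': 'a'}, {}]}): A returns (['a', None], []), B returns (['a', None], [])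
import Mathlib
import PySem

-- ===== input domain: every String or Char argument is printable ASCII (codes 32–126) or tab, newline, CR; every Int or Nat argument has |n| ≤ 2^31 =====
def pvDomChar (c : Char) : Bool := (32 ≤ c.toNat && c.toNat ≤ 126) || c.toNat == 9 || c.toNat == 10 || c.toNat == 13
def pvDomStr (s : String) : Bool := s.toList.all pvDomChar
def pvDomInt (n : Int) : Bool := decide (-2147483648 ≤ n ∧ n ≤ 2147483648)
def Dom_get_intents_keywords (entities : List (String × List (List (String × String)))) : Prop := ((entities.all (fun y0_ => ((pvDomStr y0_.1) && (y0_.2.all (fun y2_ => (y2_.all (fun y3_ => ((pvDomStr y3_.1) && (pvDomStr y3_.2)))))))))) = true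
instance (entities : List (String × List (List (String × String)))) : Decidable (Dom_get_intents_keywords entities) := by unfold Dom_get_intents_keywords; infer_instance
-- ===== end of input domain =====

-- B replaces A's forward accumulator loop with a structural recursion that builds
-- both result lists back-to-front by prepending; objective: alternative.


-- ===== PORT A =====
-- dct.get("value"): exact under Pre_ (every intent dict has a "value" key, so the
-- lookup never falls back to the default).
def pvGetValue (d : List (String × String)) : String :=
  ((PySem.Dict.mk d).get? "value").getD ""

def get_intents_keywords (entities : List (String × List (List (String × String)))) : List String × List String :=
  entities.foldl
    (fun acc kv =>
      if kv.1 == "intent" then (acc.1 ++ kv.2.map pvGetValue, acc.2)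
      else (acc.1, acc.2 ++ [kv.1]))
    ([], [])

-- ===== PORT B =====
def get_intents_keywords_alt (entities : List (String × List (List (String × String)))) : List String × List String :=
  match entities with
  | [] => ([], [])
  | kv :: rest =>
    let r := get_intents_keywords_alt rest
    if kv.1 == "intent" then (kv.2.map pvGetValue ++ r.1, r.2)
    else (r.1, kv.1 :: r.2)

-- ===== PRECONDITION & SPEC =====
-- Pre_ excludes dicts whose "intent" entries contain a dict without a "value" key,
-- on which A returns None inside the intent list — not a value of the declared
-- List String type (B's Python returns the same there).
def Pre_get_intents_keywords (entities : List (String × List (List (String × String)))) : Prop :=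
  ∀ kv ∈ entities, kv.1 = "intent" → ∀ d ∈ kv.2, "value" ∈ d.map Prod.fst

instance (entities : List (String × List (List (String × String)))) : Decidable (Pre_get_intents_keywords entities) := by
  unfold Pre_get_intents_keywords; infer_instance

def pvWitness_get_intents_keywords : (List (String × List (List (String × String)))) :=
  [("intent", [[("value", "greet")]]), ("keyword", [])]

def Spec_get_intents_keywords (entities : List (String × List (List (String × String)))) (out : List String × List String) : Prop := out = get_intents_keywords_alt entities
instance (entities : List (String × List (List (String × String)))) (out : List String × List String) : Decidable (Spec_get_intents_keywords entities out) := by unfold Spec_get_intents_keywords; infer_instance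

-- ===== CLAIM =====
def Claim_equal_get_intents_keywords : Prop := ∀ (entities : List (String × List (List (String × String)))), Dom_get_intents_keywords entities → Pre_get_intents_keywords entities → Spec_get_intents_keywords entities (get_intents_keywords entities)

-- ===== LEMMAS AND PROOFS =====

lemma pv_foldA (l : List (String × List (List (String × String)))) (a b : List String) :
    l.foldl
      (fun acc kv =>
        if kv.1 == "intent" then (acc.1 ++ kv.2.map pvGetValue, acc.2)
        else (acc.1, acc.2 ++ [kv.1]))
      (a, b)
    = (a ++ (get_intents_keywords_alt l).1, b ++ (get_intents_keywords_alt l).2) := by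
  induction l generalizing a b with
  | nil => simp [get_intents_keywords_alt]
  | cons kv t ih =>
    by_cases h : kv.1 == "intent"
    · have heq : kv.1 = "intent" := beq_iff_eq.mp h
      rw [List.foldl_cons, if_pos h, ih]
      simp [get_intents_keywords_alt, heq, List.append_assoc]
    · have hne : kv.1 ≠ "intent" := fun e => h (beq_iff_eq.mpr e)
      rw [List.foldl_cons, if_neg h, ih]
      simp [get_intents_keywords_alt, hne]

-- ===== VERDICT =====
theorem get_intents_keywords_spec : Claim_equal_get_intents_keywords := by
  intro entities _ _
  unfold Spec_get_intents_keywords get_intents_keywords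
  rw [pv_foldA]
  simp
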